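-- pv_equiv track=rewrite | github.com/15582666920/python_data_structures | disorderString.py | solutions1
-- ===== SOURCE A (Python) =====
-- def solutions1(s1, s2):
--     alist = list(s2)
--     pos1 = 0
--     flag = True
--
--     while flag and pos1 < len(s1):
--         pos2 = 0
--         found = False
--         while pos2 < len(s2) and not found:
--             if s1[pos1] == alist[pos2]:
--                 found = True
--             else:
--                 pos2 = pos2 + 1
--
--         if found:
--             alist[pos2] = None
--             pos1 = pos1 + 1
--         else:
--             flag = False
--     return flag
-- ===== SOURCE B (Python) =====
-- def solutions1(s1, s2):
--     need = {}
--     for ch in s1: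
--         need[ch] = need.get(ch, 0) + 1
--     have = {}
--     for ch in s2:
--         have[ch] = have.get(ch, 0) + 1
--     return all(have.get(ch, 0) >= n for ch, n in need.items())
-- ===== Notes on version B (the rewrite author's own statement) =====
-- stated objective: faster
-- what changed: Replaces A's greedy consume-and-mark scan (outer loop over s1 with an inner linear scan of s2's slot list, marking matched slots None) by building two character-frequency tables in one pass each and checking per-character count containment with all().
import Mathlib
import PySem

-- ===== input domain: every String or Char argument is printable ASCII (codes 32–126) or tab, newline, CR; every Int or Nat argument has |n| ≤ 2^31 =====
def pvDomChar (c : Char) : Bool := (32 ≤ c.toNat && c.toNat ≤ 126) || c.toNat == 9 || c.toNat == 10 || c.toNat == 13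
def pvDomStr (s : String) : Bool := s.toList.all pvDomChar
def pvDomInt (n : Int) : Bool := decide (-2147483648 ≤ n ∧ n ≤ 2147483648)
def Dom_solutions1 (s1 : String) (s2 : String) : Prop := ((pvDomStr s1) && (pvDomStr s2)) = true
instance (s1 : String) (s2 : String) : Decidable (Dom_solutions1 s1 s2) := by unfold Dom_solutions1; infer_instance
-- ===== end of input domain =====

-- B replaces A's greedy consume-and-mark scan (outer loop over s1, inner scan of s2's slot
-- list) by two frequency tables compared per character; same return value, no mutation.

-- ===== PORT A =====
-- inner while loop: scan alist left to right for the first slot equal to `some c`;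
-- if found, set that slot to `none` (Python: alist[pos2] = None) and report the new list.
def pvConsume (c : Char) : List (Option Char) → Option (List (Option Char))
  | [] => none
  | x :: rest =>
    if x = some c then some (none :: rest)
    else (pvConsume c rest).map (x :: ·)

-- outer while loop: pos1 walks s1; `flag = false` is the early `none` exit.
def pvOuter : List Char → List (Option Char) → Bool
  | [], _ => true
  | c :: rest, alist =>
    match pvConsume c alist with
    | some alist' => pvOuter rest alist'
    | none => false

def solutions1 (s1 : String) (s2 : String) : Bool :=
  pvOuter s1.toList (s2.toList.map some)

-- ===== PORT B =====
def solutions1_alt (s1 : String) (s2 : String) : Bool :=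
  let need := s1.toList.foldl (fun d ch => d.insert ch (d.getD ch 0 + 1)) (PySem.Dict.empty : PySem.Dict Char Int)
  let hv := s2.toList.foldl (fun d ch => d.insert ch (d.getD ch 0 + 1)) (PySem.Dict.empty : PySem.Dict Char Int)
  need.items.all (fun p => hv.getD p.1 0 ≥ p.2)

-- ===== PRECONDITION & SPEC =====
def Spec_solutions1 (s1 : String) (s2 : String) (out : Bool) : Prop := out = solutions1_alt s1 s2
instance (s1 : String) (s2 : String) (out : Bool) : Decidable (Spec_solutions1 s1 s2 out) := by unfold Spec_solutions1; infer_instance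

-- ===== CLAIM (what is proved, stated in full; the proofs are below) =====
def Claim_equal_solutions1 : Prop := ∀ (s1 : String) (s2 : String), Dom_solutions1 s1 s2 → Spec_solutions1 s1 s2 (solutions1 s1 s2)

-- ===== LEMMAS AND PROOFS =====

theorem pvConsume_eq_none_iff (c : Char) (alist : List (Option Char)) :
    pvConsume c alist = none ↔ some c ∉ alist := by
  induction alist with
  | nil => simp [pvConsume]
  | cons x rest ih =>
    simp only [pvConsume]
    split_ifs with h
    · simp [h]
    · cases hr : pvConsume c rest <;> simp [hr, List.mem_cons, ih.symm]
      exact fun hx => h hx.symm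

theorem pvConsume_count (c d : Char) (alist alist' : List (Option Char))
    (h : pvConsume c alist = some alist') :
    (alist'.count (some d) : Int)
      = (alist.count (some d) : Int) - (if d = c then 1 else 0) := by
  induction alist generalizing alist' with
  | nil => simp [pvConsume] at h
  | cons x rest ih =>
    simp only [pvConsume] at h
    split_ifs at h with hx
    · cases h
      subst hx
      by_cases hd : d = c
      · simp [hd]
      · simp [hd, Ne.symm hd]
    · cases hr : pvConsume c rest with
      | none => simp [hr] at h
      | some rest' =>
        simp only [hr, Option.map_some] at h
        cases h
        have ihr := ih rest' hr
        by_cases hxd : x = some d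
        · simp [hxd, ihr]
          split_ifs <;> omega
        · simp [hxd, ihr]

theorem count_cons_int (d c : Char) (rest : List Char) :
    ((c :: rest).count d : Int) = (rest.count d : Int) + (if d = c then 1 else 0) := by
  simp [List.count_cons]
  split_ifs <;> simp_all

theorem pvOuter_iff (l : List Char) (alist : List (Option Char)) :
    pvOuter l alist = true ↔
      ∀ c : Char, (l.count c : Int) ≤ (alist.count (some c) : Int) := by
  induction l generalizing alist with
  | nil => simp [pvOuter]
  | cons c rest ih =>
    simp only [pvOuter]
    cases h : pvConsume c alist with
    | none =>
      rw [pvConsume_eq_none_iff] at h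
      have hz : alist.count (some c) = 0 := List.count_eq_zero.mpr h
      simp only [Bool.false_eq_true, false_iff, not_forall, not_le]
      exact ⟨c, by rw [count_cons_int, hz]; simp⟩
    | some alist' =>
      rw [ih]
      constructor
      · intro hall d
        have h1 := hall d
        have hc := pvConsume_count c d alist alist' h
        rw [count_cons_int]
        by_cases hd : d = c
        · subst hd; simp at hc ⊢; omega
        · simp [hd] at hc ⊢; omega
      · intro hall d
        have h1 := hall d
        have hc := pvConsume_count c d alist alist' h
        rw [count_cons_int] at h1
        by_cases hd : d = c
        · subst hd; simp at hc h1; omega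
        · simp [hd] at hc h1; omega

theorem count_some_map (c : Char) (l : List Char) :
    (l.map some).count (some c) = l.count c := by
  rw [List.count_map_of_injective l some (fun a b => Option.some_inj.mp)]

theorem solutions1_alt_iff (s1 s2 : String) :
    solutions1_alt s1 s2 = true ↔
      ∀ c ∈ PySem.Set.ofList s1.toList,
        (s1.toList.count c : Int) ≤ (s2.toList.count c : Int) := by
  rw [show solutions1_alt s1 s2
        = (PySem.Dict.counter s1.toList).items.all
            (fun p => decide ((PySem.Dict.counter s2.toList).getD p.1 0 ≥ p.2)) from rfl]
  rw [PySem.Dict.items_counter]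
  simp only [List.all_eq_true, List.mem_map, ge_iff_le, decide_eq_true_eq]
  constructor
  · intro h c hc
    have := h (c, (s1.toList.count c : Int)) ⟨c, hc, rfl⟩
    simpa [PySem.Dict.getD_counter] using this
  · rintro h p ⟨c, hc, rfl⟩
    simpa [PySem.Dict.getD_counter] using h c hc

-- ===== VERDICT (by name: the statement is the Claim_ definition above) =====
theorem solutions1_spec : Claim_equal_solutions1 := by
  intro s1 s2 _
  unfold Spec_solutions1 solutions1
  rw [Bool.eq_iff_iff, pvOuter_iff, solutions1_alt_iff]
  constructor
  · intro h c _
    have := h c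
    rwa [count_some_map] at this
  · intro h c
    rw [count_some_map]
    by_cases hc : c ∈ s1.toList
    · exact h c (by simpa [PySem.Set.mem_ofList] using hc)
    · simp [List.count_eq_zero.mpr hc]
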